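-- pv_equiv track=rewrite | github.com/YifanWang2002/minsy_mvp_backend_v2 | packages/infra/providers/trading/adapters/sandbox_trading.py | _infer_market
-- ===== SOURCE A (Python) =====
-- _CRYPTO_QUOTES = ("USDT", "USDC", "USD", "BTC", "ETH", "EUR")
--
-- def _normalize_symbol(symbol: str) -> str:
--     text = str(symbol or "").strip().upper()
--     if not text:
--         return "BTC/USD"
--     if "/" in text:
--         base, quote = text.split("/", 1)
--         if base and quote:
--             return f"{base}/{quote}"
--     compact = text.replace("-", "").replace("/", "")
--     for quote in _CRYPTO_QUOTES:
--         if compact.endswith(quote) and len(compact) > len(quote):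
--             base = compact[: -len(quote)]
--             return f"{base}/{quote}"
--     return compact
--
-- def _infer_market(symbol: str) -> str:
--     normalized = _normalize_symbol(symbol)
--     if "/" in normalized:
--         return "crypto"
--     compact = normalized.replace("/", "")
--     for quote in _CRYPTO_QUOTES:
--         if compact.endswith(quote) and len(compact) > len(quote):
--             return "crypto"
--     return "stocks"
-- ===== SOURCE B (Python) =====
-- _CRYPTO_QUOTES = ("USDT", "USDC", "USD", "BTC", "ETH", "EUR")
--
-- def _infer_market(symbol: str) -> str:
--     text = str(symbol or "").strip().upper()
--     if not text:
--         return "crypto"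
--     if "/" in text:
--         base, quote = text.split("/", 1)
--         if base and quote:
--             return "crypto"
--     compact = text.replace("-", "").replace("/", "")
--     if any(compact.endswith(q) and len(compact) > len(q) for q in _CRYPTO_QUOTES):
--         return "crypto"
--     return "stocks"
-- ===== Notes on version B (the rewrite author's own statement) =====
-- stated objective: simpler
-- what changed: B inlines _normalize_symbol into _infer_market as one flat pass with direct returns: it never builds a normalized string, and the redundant second suffix-scan over _CRYPTO_QUOTES (and the second '/' removal) disappears, replaced by a single any() over the quote tuple.
import Mathlib
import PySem

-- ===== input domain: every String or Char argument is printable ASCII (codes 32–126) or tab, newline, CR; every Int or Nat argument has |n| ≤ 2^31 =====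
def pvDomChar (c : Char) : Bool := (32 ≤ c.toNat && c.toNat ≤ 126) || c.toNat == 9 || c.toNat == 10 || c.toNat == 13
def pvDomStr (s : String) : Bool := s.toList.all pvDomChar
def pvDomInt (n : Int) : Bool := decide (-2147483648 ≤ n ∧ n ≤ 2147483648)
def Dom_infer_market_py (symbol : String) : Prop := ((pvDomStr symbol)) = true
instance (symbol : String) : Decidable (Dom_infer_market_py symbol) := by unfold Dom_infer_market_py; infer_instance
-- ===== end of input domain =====

-- B inlines the _normalize_symbol helper into a single flat pass with direct returns
-- (no normalized string is built and the redundant second suffix loop disappears); objective: simpler.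

-- ===== PORT A =====
def pvCryptoQuotes : List String := ["USDT", "USDC", "USD", "BTC", "ETH", "EUR"]

-- the 'for quote in _CRYPTO_QUOTES' loop of _normalize_symbol
def pvNormLoop (compact : String) : List String → String
  | [] => compact
  | q :: rest =>
    if PySem.Str.endswith compact q && decide (PySem.Str.len q < PySem.Str.len compact) then
      PySem.Str.slice compact none (some (-(PySem.Str.len q))) ++ "/" ++ q
    else pvNormLoop compact rest

-- the shared fall-through tail of _normalize_symbol (the compact/suffix-loop code)
def pvNormTail (text : String) : String :=
  pvNormLoop (PySem.Str.replace (PySem.Str.replace text "-" "") "/" "") pvCryptoQuotes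

def pvNormalizeSymbol (symbol : String) : String :=
  let text := PySem.Str.upper (PySem.Str.strip symbol)
  if text = "" then "BTC/USD"
  else if PySem.Str.isIn "/" text then
    -- base, quote = text.split("/", 1)  ('/' present, so the split has two pieces)
    let parts := (PySem.Str.splitMax? text "/" 1).getD []
    let base := parts.headD ""
    let quote := (parts.drop 1).headD ""
    if base != "" && quote != "" then base ++ "/" ++ quote else pvNormTail text
  else pvNormTail text

-- the 'for quote in _CRYPTO_QUOTES' loop of _infer_market
def pvInferLoop (compact : String) : List String → String
  | [] => "stocks"
  | q :: rest =>
    if PySem.Str.endswith compact q && decide (PySem.Str.len q < PySem.Str.len compact) then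
      "crypto"
    else pvInferLoop compact rest

def infer_market_py (symbol : String) : String :=
  let normalized := pvNormalizeSymbol symbol
  if PySem.Str.isIn "/" normalized then "crypto"
  else pvInferLoop (PySem.Str.replace normalized "/" "") pvCryptoQuotes

-- ===== PORT B =====
def infer_market_py_alt (symbol : String) : String :=
  let text := PySem.Str.upper (PySem.Str.strip symbol)
  if text = "" then "crypto"
  else
    let slashHit : Bool :=
      if PySem.Str.isIn "/" text then
        let parts := (PySem.Str.splitMax? text "/" 1).getD []
        parts.headD "" != "" && (parts.drop 1).headD "" != ""
      else false
    if slashHit then "crypto"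
    else
      let compact := PySem.Str.replace (PySem.Str.replace text "-" "") "/" ""
      if pvCryptoQuotes.any (fun q =>
          PySem.Str.endswith compact q && decide (PySem.Str.len q < PySem.Str.len compact)) then
        "crypto"
      else "stocks"

-- ===== PRECONDITION & SPEC =====
def Spec_infer_market_py (symbol : String) (out : String) : Prop := out = infer_market_py_alt symbol
instance (symbol : String) (out : String) : Decidable (Spec_infer_market_py symbol out) := by unfold Spec_infer_market_py; infer_instance

-- ===== CLAIM (what is proved, stated in full; the proofs are below) =====
def Claim_equal_infer_market_py : Prop := ∀ (symbol : String), Dom_infer_market_py symbol → Spec_infer_market_py symbol (infer_market_py symbol)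

-- ===== LEMMAS AND PROOFS =====

-- replace.go with a single-char pattern and empty replacement is a filter
theorem pvReplaceGo_filter (c : Char) (fuel : Nat) (l acc : List Char)
    (h : l.length ≤ fuel) :
    PySem.Chars.replace.go [c] [] fuel l acc = acc.reverse ++ l.filter (· != c) := by
  induction fuel generalizing l acc with
  | zero =>
    cases l with
    | nil => simp [PySem.Chars.replace.go]
    | cons x t => simp at h
  | succ n ih =>
    cases l with
    | nil => simp [PySem.Chars.replace.go]
    | cons x t =>
      simp only [List.length_cons, Nat.add_le_add_iff_right] at h
      by_cases hc : c = x
      · subst hc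
        simp [PySem.Chars.replace.go, List.isPrefixOf, ih t acc h]
      · have hpre : [c].isPrefixOf (x :: t) = false := by
          simp [List.isPrefixOf]; exact fun hxc => hc hxc
        simp [PySem.Chars.replace.go, hpre, ih t (x :: acc) h, bne, Ne.symm hc]

theorem pvReplace_filter (c : Char) (l : List Char) :
    PySem.Chars.replace l [c] [] = l.filter (· != c) := by
  simpa [PySem.Chars.replace] using pvReplaceGo_filter c l.length l []

theorem pvIsIn_slash_iff (s : String) :
    PySem.Str.isIn "/" s = true ↔ '/' ∈ s.toList := by
  rw [PySem.Str.isIn_iff_infix]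
  exact List.singleton_infix_iff '/' s.toList

theorem pvReplace_slash_toList (x : String) :
    (PySem.Str.replace x "/" "").toList = x.toList.filter (· != '/') := by
  show (String.ofList (PySem.Chars.replace x.toList "/".toList "".toList)).toList = _
  rw [String.toList_ofList]
  show PySem.Chars.replace x.toList ['/'] [] = _
  exact pvReplace_filter '/' x.toList

-- compact = ….replace("/","") contains no '/'
theorem pvCompact_no_slash (x : String) :
    PySem.Str.isIn "/" (PySem.Str.replace x "/" "") = false := by
  rw [Bool.eq_false_iff, Ne, pvIsIn_slash_iff, pvReplace_slash_toList]
  simp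

-- a second '/'-removal is the identity
theorem pvReplace_slash_idem (x : String) :
    PySem.Str.replace (PySem.Str.replace x "/" "") "/" "" = PySem.Str.replace x "/" "" := by
  have h1 : (PySem.Str.replace (PySem.Str.replace x "/" "") "/" "").toList
      = (PySem.Str.replace x "/" "").toList := by
    rw [pvReplace_slash_toList, pvReplace_slash_toList]
    rw [List.filter_filter]
    simp
  calc PySem.Str.replace (PySem.Str.replace x "/" "") "/" ""
      = String.ofList (PySem.Str.replace (PySem.Str.replace x "/" "") "/" "").toList := String.ofList_toList.symm
    _ = String.ofList (PySem.Str.replace x "/" "").toList := by rw [h1]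
    _ = PySem.Str.replace x "/" "" := String.ofList_toList

-- if no quote matches, the normalize loop returns compact unchanged
theorem pvNormLoop_none (compact : String) (qs : List String)
    (h : qs.any (fun q => PySem.Str.endswith compact q && decide (PySem.Str.len q < PySem.Str.len compact)) = false) :
    pvNormLoop compact qs = compact := by
  induction qs with
  | nil => rfl
  | cons q rest ih =>
    simp only [List.any_cons, Bool.or_eq_false_iff] at h
    rw [pvNormLoop, h.1]
    exact ih h.2

-- if some quote matches, the normalize loop returns a string containing '/'
theorem pvNormLoop_slash (compact : String) (qs : List String)
    (h : qs.any (fun q => PySem.Str.endswith compact q && decide (PySem.Str.len q < PySem.Str.len compact)) = true) :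
    PySem.Str.isIn "/" (pvNormLoop compact qs) = true := by
  induction qs with
  | nil => simp at h
  | cons q rest ih =>
    simp only [List.any_cons, Bool.or_eq_true] at h
    cases hq : (PySem.Str.endswith compact q && decide (PySem.Str.len q < PySem.Str.len compact)) with
    | true =>
      rw [pvNormLoop, hq]
      simp only [if_true]
      rw [pvIsIn_slash_iff]
      simp [String.toList_append]
    | false =>
      rw [pvNormLoop, hq]
      simp only [Bool.false_eq_true, if_false]
      apply ih
      rcases h with h1 | h2
      · rw [h1] at hq; exact absurd hq (by simp)
      · exact h2

-- if no quote matches, the infer loop returns "stocks"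
theorem pvInferLoop_stocks (compact : String) (qs : List String)
    (h : qs.any (fun q => PySem.Str.endswith compact q && decide (PySem.Str.len q < PySem.Str.len compact)) = false) :
    pvInferLoop compact qs = "stocks" := by
  induction qs with
  | nil => rfl
  | cons q rest ih =>
    simp only [List.any_cons, Bool.or_eq_false_iff] at h
    rw [pvInferLoop, h.1]
    exact ih h.2

-- the shared fall-through: A run on the compact string equals B's any-test
theorem pvCompactCase (text : String) :
    (if PySem.Str.isIn "/" (pvNormTail text) then "crypto"
     else pvInferLoop (PySem.Str.replace (pvNormTail text) "/" "") pvCryptoQuotes) =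
    (if pvCryptoQuotes.any (fun q =>
         PySem.Str.endswith (PySem.Str.replace (PySem.Str.replace text "-" "") "/" "") q
           && decide (PySem.Str.len q < PySem.Str.len (PySem.Str.replace (PySem.Str.replace text "-" "") "/" ""))) then
       "crypto"
     else "stocks") := by
  unfold pvNormTail
  set compact := PySem.Str.replace (PySem.Str.replace text "-" "") "/" "" with hc
  cases hany : pvCryptoQuotes.any (fun q =>
      PySem.Str.endswith compact q && decide (PySem.Str.len q < PySem.Str.len compact)) with
  | true =>
    rw [pvNormLoop_slash compact pvCryptoQuotes hany]
    simp
  | false =>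
    rw [pvNormLoop_none compact pvCryptoQuotes hany]
    have hno : PySem.Str.isIn "/" compact = false := by
      rw [hc]; exact pvCompact_no_slash (PySem.Str.replace text "-" "")
    rw [hno]
    have hid : PySem.Str.replace compact "/" "" = compact := by
      rw [hc]; exact pvReplace_slash_idem (PySem.Str.replace text "-" "")
    simp only [Bool.false_eq_true, if_false, hid]
    exact pvInferLoop_stocks compact pvCryptoQuotes hany

-- ===== VERDICT (by name: the statement is the Claim_ definition above) =====
set_option maxHeartbeats 2000000 in
theorem infer_market_py_spec : Claim_equal_infer_market_py := by
  intro symbol _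
  show infer_market_py symbol = infer_market_py_alt symbol
  unfold infer_market_py infer_market_py_alt pvNormalizeSymbol
  simp only []
  generalize PySem.Str.upper (PySem.Str.strip symbol) = text
  by_cases he : text = ""
  · subst he
    decide
  · rw [if_neg he, if_neg he]
    cases hs : PySem.Str.isIn "/" text with
    | true =>
      simp only [reduceIte]
      cases hbq : (((PySem.Str.splitMax? text "/" 1).getD []).headD "" != ""
          && (((PySem.Str.splitMax? text "/" 1).getD []).drop 1).headD "" != "") with
      | true =>
        simp only [reduceIte]
        have hin : PySem.Str.isIn "/" (((PySem.Str.splitMax? text "/" 1).getD []).headD "" ++ "/"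
            ++ (((PySem.Str.splitMax? text "/" 1).getD []).drop 1).headD "") = true := by
          rw [pvIsIn_slash_iff]; simp [String.toList_append]
        rw [hin]
        simp
      | false =>
        simp only [Bool.false_eq_true, reduceIte]
        exact pvCompactCase text
    | false =>
      simp only [Bool.false_eq_true, reduceIte]
      exact pvCompactCase text
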